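-- pv_equiv track=rewrite | github.com/HCrescent/Advent-of-Code | 2019/Python/day04.py | pass1
-- ===== SOURCE A (Python) =====
-- def pass1(cand_nums):
-- 	candidate_list2 = []
-- 	for number in cand_nums:
-- 		width = len(str(number))
-- 		test_digit = 0
-- 		for magnitude in range(width)[::-1]:
-- 			selected_digit = (number // 10 ** magnitude) % 10
-- 			if selected_digit < test_digit:
-- 				break
-- 			test_digit = selected_digit
-- 		else:
-- 			candidate_list2.append(number)
-- 	return candidate_list2
-- ===== SOURCE B (Python) =====
-- def pass1(cand_nums):
--     def digits(number):
--         width = len(str(number))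
--         return [(number // 10 ** mag) % 10 for mag in reversed(range(width))]
--     return [n for n in cand_nums if digits(n) == sorted(digits(n))]
-- ===== Notes on version B (the rewrite author's own statement) =====
-- stated objective: simpler
-- what changed: Replaces A's inner early-break scan with accumulator state by extracting the full digit list (same floor-division arithmetic) and deciding membership via digits == sorted(digits), building the result as a single comprehension.
import Mathlib
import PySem

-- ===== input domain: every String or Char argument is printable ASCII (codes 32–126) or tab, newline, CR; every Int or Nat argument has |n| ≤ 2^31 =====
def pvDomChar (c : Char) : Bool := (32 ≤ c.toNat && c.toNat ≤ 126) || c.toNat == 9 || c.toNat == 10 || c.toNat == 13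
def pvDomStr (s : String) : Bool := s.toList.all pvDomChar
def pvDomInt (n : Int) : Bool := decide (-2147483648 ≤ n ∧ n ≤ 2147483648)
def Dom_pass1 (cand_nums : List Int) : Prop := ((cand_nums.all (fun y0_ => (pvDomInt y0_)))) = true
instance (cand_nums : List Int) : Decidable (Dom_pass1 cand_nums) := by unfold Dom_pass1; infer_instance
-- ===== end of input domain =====

-- B replaces A's early-break digit scan by a full digit list compared with its sort (simpler decomposition, same cost).


-- ===== PORT A =====
-- the inner 'for magnitude in range(width)[::-1]: … break / else append'; returns true iff the loop
-- completed without break.  magnitudes come from range(width) so they are ≥ 0: 10 ** magnitude = 10 ^ m.toNat exactly.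
def pvScanA (number : Int) : List Int → Int → Bool
  | [], _ => true
  | m :: ms, test_digit =>
      let selected_digit := PySem.Int.mod (PySem.Int.floordiv number (10 ^ m.toNat)) 10
      if selected_digit < test_digit then false else pvScanA number ms selected_digit

def pass1 (cand_nums : List Int) : List Int :=
  cand_nums.foldl (fun candidate_list2 number =>
    let width := PySem.Str.len (PySem.Int.toStr number)
    if pvScanA number ((PySem.List.pyRange 0 width 1).reverse) 0
    then candidate_list2 ++ [number] else candidate_list2) []

-- ===== PORT B =====
-- digits(number): the digit list most-significant first, same floor-division arithmetic as A
def pvDigitsB (number : Int) : List Int :=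
  ((PySem.List.pyRange 0 (PySem.Str.len (PySem.Int.toStr number)) 1).reverse).map
    (fun mag => PySem.Int.mod (PySem.Int.floordiv number (10 ^ mag.toNat)) 10)

def pass1_alt (cand_nums : List Int) : List Int :=
  cand_nums.filter (fun n => pvDigitsB n == PySem.List.sorted (pvDigitsB n) (fun x => x) false)

-- ===== PRECONDITION & SPEC =====
def Spec_pass1 (cand_nums : List Int) (out : List Int) : Prop := out = pass1_alt cand_nums
instance (cand_nums : List Int) (out : List Int) : Decidable (Spec_pass1 cand_nums out) := by unfold Spec_pass1; infer_instance

-- ===== CLAIM (what is proved, stated in full; the proofs are below) =====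
def Claim_equal_pass1 : Prop := ∀ (cand_nums : List Int), Dom_pass1 cand_nums → Spec_pass1 cand_nums (pass1 cand_nums)

-- ===== LEMMAS AND PROOFS =====

-- each extracted digit is nonnegative ((… % 10) with positive divisor)
theorem pvDigit_nonneg (n m : Int) : 0 ≤ PySem.Int.mod (PySem.Int.floordiv n (10 ^ m.toNat)) 10 := by
  rw [PySem.Int.mod_eq_emod_of_pos (by norm_num : (0:Int) < 10)]
  exact Int.emod_nonneg _ (by norm_num)

-- A's scan succeeds iff the accumulator followed by the digit sequence is a ≤-chain
theorem pvScanA_iff_chain (n : Int) (ms : List Int) (t : Int) :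
    pvScanA n ms t = true ↔
      List.IsChain (· ≤ ·)
        (t :: ms.map (fun m => PySem.Int.mod (PySem.Int.floordiv n (10 ^ m.toNat)) 10)) := by
  induction ms generalizing t with
  | nil => simp [pvScanA]
  | cons m ms ih =>
      simp only [pvScanA, List.map_cons, List.isChain_cons_cons]
      split_ifs with h
      · simp only [false_iff]
        intro hc
        exact absurd hc.1 (by omega)
      · simp only [ih]
        exact ⟨fun hc => ⟨by omega, hc⟩, fun hc => hc.2⟩

-- a list equals its (identity-key) Python sort iff it is pairwise ≤
theorem eq_sorted_iff_pairwise (ds : List Int) :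
    ds = PySem.List.sorted ds (fun x => x) false ↔ ds.Pairwise (· ≤ ·) := by
  constructor
  · intro h
    have hpw := PySem.List.sorted_pairwise (xs := ds) (key := fun x => x)
    rw [← h] at hpw
    exact hpw
  · intro h
    exact (PySem.List.sorted_eq_self_of_pairwise ds (fun x => x) h).symm

-- the per-number decisions of A and B agree
theorem decision_eq (n : Int) :
    pvScanA n ((PySem.List.pyRange 0 (PySem.Str.len (PySem.Int.toStr n)) 1).reverse) 0
      = (pvDigitsB n == PySem.List.sorted (pvDigitsB n) (fun x => x) false) := by
  have hchain := pvScanA_iff_chain n ((PySem.List.pyRange 0 (PySem.Str.len (PySem.Int.toStr n)) 1).reverse) 0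
  rw [show ((PySem.List.pyRange 0 (PySem.Str.len (PySem.Int.toStr n)) 1).reverse).map
        (fun m => PySem.Int.mod (PySem.Int.floordiv n (10 ^ m.toNat)) 10) = pvDigitsB n from rfl] at hchain
  have hnn : ∀ d ∈ pvDigitsB n, (0 : Int) ≤ d := by
    intro d hd
    simp only [pvDigitsB, List.mem_map] at hd
    obtain ⟨m, _, hm⟩ := hd
    rw [← hm]; exact pvDigit_nonneg n m
  have hiff : List.IsChain (· ≤ ·) (0 :: pvDigitsB n) ↔ (pvDigitsB n).Pairwise (· ≤ ·) := by
    rw [List.isChain_iff_pairwise, List.pairwise_cons]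
    exact ⟨fun h => h.2, fun h => ⟨hnn, h⟩⟩
  by_cases hp : (pvDigitsB n).Pairwise (· ≤ ·)
  · have h1 : pvScanA n ((PySem.List.pyRange 0 (PySem.Str.len (PySem.Int.toStr n)) 1).reverse) 0 = true := by
      rw [hchain, hiff]; exact hp
    have h2 := (eq_sorted_iff_pairwise (pvDigitsB n)).mpr hp
    rw [h1, ← h2]; simp
  · have h1 : pvScanA n ((PySem.List.pyRange 0 (PySem.Str.len (PySem.Int.toStr n)) 1).reverse) 0 = false := by
      rw [Bool.eq_false_iff]
      exact fun hc => hp (hiff.mp (hchain.mp hc))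
    have h2 : ¬ pvDigitsB n = PySem.List.sorted (pvDigitsB n) (fun x => x) false :=
      fun h => hp ((eq_sorted_iff_pairwise _).mp h)
    rw [h1]
    simp [h2]

-- ===== VERDICT (by name: the statement is the Claim_ definition above) =====
theorem pass1_spec : Claim_equal_pass1 := by
  intro cand_nums _
  unfold Spec_pass1 pass1 pass1_alt
  rw [PySem.List.foldl_append_if_eq_filter]
  rw [List.nil_append]
  apply List.filter_congr
  intro n _
  exact decision_eq n
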